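-- pv_equiv track=rewrite | github.com/HugoAlejandro2002/empleaplus-ia-service | src/generators/resume_capybara/formatter.py | format_skills_and_softwares
-- ===== SOURCE A (Python) =====
-- def escape(text: str) -> str:
--     if not text:
--         return ""
--     return (
--         text.replace("&", r"\&")
--             .replace("%", r"\%")
--             .replace("_", r"\_")
--             .replace("$", r"\$")
--     )
--
-- def format_skills_and_softwares(skills: list[str], softwares: list[str]) -> str:
--     ns = len(skills)
--     nf = len(softwares)
--     if ns + nf == 0:
--         return ""
--     # número de filas = máximo de mitades de cada lista
--     half_s = (ns + 1) // 2
--     half_f = (nf + 1) // 2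
--     rows = max(half_s, half_f)
--
--     section  = "\\vspace{0.2cm}\n"
--     section += "\\noindent\\textbf{HABILIDADES \\& SOFTWARES}\\\\\n"
--     section += "\\noindent\\begin{tabularx}{\\textwidth}{XXXX}\n"
--
--     for i in range(rows):
--         # extraemos skill columna 1 y 2
--         s1 = skills[i] if i < ns else ""
--         s2 = skills[i + half_s] if i + half_s < ns else ""
--         # extraemos software columna 3 y 4
--         f1 = softwares[i] if i < nf else ""
--         f2 = softwares[i + half_f] if i + half_f < nf else ""
--
--         # convertimos a bullets o cadena vacía
--         c1 = f"\\textbullet\\ {escape(s1)}" if s1 else ""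
--         c2 = f"\\textbullet\\ {escape(s2)}" if s2 else ""
--         c3 = f"\\textbullet\\ {escape(f1)}" if f1 else ""
--         c4 = f"\\textbullet\\ {escape(f2)}" if f2 else ""
--
--         section += f"{c1} & {c2} & {c3} & {c4}\\\\\n"
--
--     section += "\\end{tabularx}\n"
--     return section
-- ===== SOURCE B (Python) =====
-- _ESC = str.maketrans({"&": r"\&", "%": r"\%", "_": r"\_", "$": r"\$"})
--
-- def _scatter(items: list[str], half: int, rows: int, grid: list[list[str]], off: int) -> None:
--     # place each item directly at its grid position(s): item i fills (i, off) when
--     # i < rows, and (i - half, off + 1) when i >= half (each cell written at most once)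
--     for i, s in enumerate(items):
--         if s:
--             cell = "\\textbullet\\ " + s.translate(_ESC)
--             if i < rows:
--                 grid[i][off] = cell
--             if i >= half:
--                 grid[i - half][off + 1] = cell
--
-- def format_skills_and_softwares(skills: list[str], softwares: list[str]) -> str:
--     if not skills and not softwares:
--         return ""
--     half_s = (len(skills) + 1) // 2
--     half_f = (len(softwares) + 1) // 2
--     rows = max(half_s, half_f)
--     grid = [["", "", "", ""] for _ in range(rows)]
--     _scatter(skills, half_s, rows, grid, 0)
--     _scatter(softwares, half_f, rows, grid, 2)
--     body = "".join(" & ".join(row) + "\\\\\n" for row in grid)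
--     return ("\\vspace{0.2cm}\n"
--             "\\noindent\\textbf{HABILIDADES \\& SOFTWARES}\\\\\n"
--             "\\noindent\\begin{tabularx}{\\textwidth}{XXXX}\n"
--             + body + "\\end{tabularx}\n")
-- ===== Notes on version B (the rewrite author's own statement) =====
-- stated objective: alternative
-- what changed: B inverts the traversal direction: instead of A's gather (for each row, fetch the four entries by index arithmetic with bound guards), B allocates the rows-by-4 grid of empty cells once and makes a single scatter pass over each input list, writing each element directly into its destination cell(s) computed from its own index, then renders the finished grid; escaping uses one str.translate table pass instead of four chained str.replace passes.
import Mathlib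
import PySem

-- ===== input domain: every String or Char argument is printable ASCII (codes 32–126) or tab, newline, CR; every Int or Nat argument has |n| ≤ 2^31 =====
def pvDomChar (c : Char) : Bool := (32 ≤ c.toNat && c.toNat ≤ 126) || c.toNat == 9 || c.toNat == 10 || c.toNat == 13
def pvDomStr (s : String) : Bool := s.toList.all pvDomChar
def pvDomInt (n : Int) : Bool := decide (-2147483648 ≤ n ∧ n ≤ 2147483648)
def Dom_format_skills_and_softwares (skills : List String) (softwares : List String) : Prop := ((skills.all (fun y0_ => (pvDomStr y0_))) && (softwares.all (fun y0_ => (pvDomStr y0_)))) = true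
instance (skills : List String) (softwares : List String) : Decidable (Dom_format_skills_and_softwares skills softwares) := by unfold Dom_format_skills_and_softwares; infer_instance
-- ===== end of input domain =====

-- B inverts the traversal: instead of gathering, per row, the four entries by index
-- arithmetic as A does, it scatters each list element once into its cell(s) of a
-- pre-built rows×4 grid and then renders the grid; same return value everywhere.

-- ===== PORT A =====
-- escape(text): guard for falsy (empty) string, then the chained str.replace calls
def pyEscape (text : String) : String :=
  if text = "" then ""
  else PySem.Str.replace (PySem.Str.replace (PySem.Str.replace
         (PySem.Str.replace text "&" "\\&") "%" "\\%") "_" "\\_") "$" "\\$"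

def format_skills_and_softwares (skills : List String) (softwares : List String) : String :=
  let ns : Int := skills.length
  let nf : Int := softwares.length
  if ns + nf = 0 then ""
  else
    let half_s := PySem.Int.floordiv (ns + 1) 2
    let half_f := PySem.Int.floordiv (nf + 1) 2
    let rows := max half_s half_f
    let sec := "\\vspace{0.2cm}\n"
    let sec := sec ++ "\\noindent\\textbf{HABILIDADES \\& SOFTWARES}\\\\\n"
    let sec := sec ++ "\\noindent\\begin{tabularx}{\\textwidth}{XXXX}\n"
    let sec := (PySem.List.pyRange 0 rows 1).foldl (fun acc i =>
      let s1 := if i < ns then PySem.List.pyGetD skills i "" else ""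
      let s2 := if i + half_s < ns then PySem.List.pyGetD skills (i + half_s) "" else ""
      let f1 := if i < nf then PySem.List.pyGetD softwares i "" else ""
      let f2 := if i + half_f < nf then PySem.List.pyGetD softwares (i + half_f) "" else ""
      let c1 := if s1 ≠ "" then "\\textbullet\\ " ++ pyEscape s1 else ""
      let c2 := if s2 ≠ "" then "\\textbullet\\ " ++ pyEscape s2 else ""
      let c3 := if f1 ≠ "" then "\\textbullet\\ " ++ pyEscape f1 else ""
      let c4 := if f2 ≠ "" then "\\textbullet\\ " ++ pyEscape f2 else ""
      acc ++ (c1 ++ " & " ++ c2 ++ " & " ++ c3 ++ " & " ++ c4 ++ "\\\\\n")) sec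
    sec ++ "\\end{tabularx}\n"

-- ===== PORT B =====
-- str.translate with the 4-entry table: one pass over the characters
def escChar (c : Char) : List Char :=
  if c = '&' then ['\\', '&'] else if c = '%' then ['\\', '%']
  else if c = '_' then ['\\', '_'] else if c = '$' then ['\\', '$'] else [c]

def escB (text : String) : String := String.ofList (text.toList.flatMap escChar)

def bulletB (s : String) : String := "\\textbullet\\ " ++ escB s

-- body of Source B's _scatter loop: one item placed at its grid position(s)
def place (g : List (List String)) (off half rows i : Nat) (s : String) : List (List String) :=
  if s ≠ "" then
    let g1 := if i < rows then g.modify i (fun row => row.set off (bulletB s)) else g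
    if half ≤ i then g1.modify (i - half) (fun row => row.set (off + 1) (bulletB s)) else g1
  else g

-- _scatter(items, half, rows, grid, off): fold of place over enumerate(items)
def scatter (off half rows : Nat) (g : List (List String)) (xs : List (String × Nat)) : List (List String) :=
  xs.foldl (fun acc p => place acc off half rows p.2 p.1) g

def format_skills_and_softwares_alt (skills : List String) (softwares : List String) : String :=
  if skills.isEmpty && softwares.isEmpty then ""
  else
    let half_s := (skills.length + 1) / 2
    let half_f := (softwares.length + 1) / 2
    let rows := max half_s half_f
    let grid := List.replicate rows ["", "", "", ""]
    let grid := scatter 0 half_s rows grid skills.zipIdx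
    let grid := scatter 2 half_f rows grid softwares.zipIdx
    let body := String.join (grid.map (fun row => PySem.Str.join " & " row ++ "\\\\\n"))
    "\\vspace{0.2cm}\n" ++ "\\noindent\\textbf{HABILIDADES \\& SOFTWARES}\\\\\n" ++
      "\\noindent\\begin{tabularx}{\\textwidth}{XXXX}\n" ++ body ++ "\\end{tabularx}\n"

-- ===== PRECONDITION & SPEC =====
def Spec_format_skills_and_softwares (skills : List String) (softwares : List String) (out : String) : Prop := out = format_skills_and_softwares_alt skills softwares
instance (skills : List String) (softwares : List String) (out : String) : Decidable (Spec_format_skills_and_softwares skills softwares out) := by unfold Spec_format_skills_and_softwares; infer_instance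

-- ===== CLAIM (what is proved, stated in full; the proofs are below) =====
def Claim_equal_format_skills_and_softwares : Prop := ∀ (skills : List String) (softwares : List String), Dom_format_skills_and_softwares skills softwares → Spec_format_skills_and_softwares skills softwares (format_skills_and_softwares skills softwares)

-- ===== LEMMAS AND PROOFS =====

-- ---- escape: the four chained replaces equal the per-character table ----

theorem replace_go_single (o : Char) (new : List Char) :
    ∀ (fuel : Nat) (l acc : List Char), l.length ≤ fuel →
      PySem.Chars.replace.go [o] new fuel l acc
        = acc.reverse ++ l.flatMap (fun c => if c = o then new else [c]) := by
  intro fuel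
  induction fuel with
  | zero =>
    intro l acc h
    have : l = [] := List.eq_nil_of_length_eq_zero (Nat.le_zero.mp h)
    subst this
    simp [PySem.Chars.replace.go]
  | succ n ih =>
    intro l acc h
    cases l with
    | nil => simp [PySem.Chars.replace.go]
    | cons c t =>
      rw [PySem.Chars.replace.go]
      by_cases hc : c = o
      · subst hc
        simp only [List.isPrefixOf, BEq.rfl, Bool.true_and, if_true]
        rw [ih _ _ (by simpa using Nat.le_of_succ_le_succ h)]
        simp
      · have hpre : ([o].isPrefixOf (c :: t)) = false := by
          simp [List.isPrefixOf]
          exact fun hoc => absurd hoc.symm hc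
        rw [hpre]
        simp only [Bool.false_eq_true, if_false]
        rw [ih _ _ (by simpa using Nat.le_of_succ_le_succ h)]
        simp [hc]

theorem replace_single (l : List Char) (o : Char) (new : List Char) :
    PySem.Chars.replace l [o] new = l.flatMap (fun c => if c = o then new else [c]) := by
  rw [PySem.Chars.replace]
  simp only [List.isEmpty_cons, Bool.false_eq_true, if_false]
  simpa using replace_go_single o new l.length l [] (le_refl _)

theorem flat4 (l : List Char) :
    ((((l.flatMap (fun c => if c = '&' then ['\\', '&'] else [c])).flatMap
        (fun c => if c = '%' then ['\\', '%'] else [c])).flatMap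
        (fun c => if c = '_' then ['\\', '_'] else [c])).flatMap
        (fun c => if c = '$' then ['\\', '$'] else [c])) = l.flatMap escChar := by
  induction l with
  | nil => rfl
  | cons c t ih =>
    simp only [List.flatMap_cons, List.flatMap_append] at *
    rw [ih]
    congr 1
    by_cases h1 : c = '&'
    · subst h1; decide
    by_cases h2 : c = '%'
    · subst h2; decide
    by_cases h3 : c = '_'
    · subst h3; decide
    by_cases h4 : c = '$'
    · subst h4; decide
    simp [escChar, h1, h2, h3, h4]

theorem escape_eq (t : String) : pyEscape t = escB t := by
  by_cases ht : t = ""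
  · subst ht; rfl
  · rw [pyEscape, if_neg ht]
    simp only [PySem.Str.replace, String.toList_ofList]
    rw [show ("&" : String).toList = ['&'] by decide,
        show ("%" : String).toList = ['%'] by decide,
        show ("_" : String).toList = ['_'] by decide,
        show ("$" : String).toList = ['$'] by decide,
        show ("\\&" : String).toList = ['\\', '&'] by decide,
        show ("\\%" : String).toList = ['\\', '%'] by decide,
        show ("\\_" : String).toList = ['\\', '_'] by decide,
        show ("\\$" : String).toList = ['\\', '$'] by decide]
    rw [replace_single, replace_single, replace_single, replace_single, flat4, escB]

-- the common cell value both sides produce for a (possibly empty) entry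
def cellB (t : String) : String := if t ≠ "" then "\\textbullet\\ " ++ escB t else ""

theorem cell_eq (t : String) :
    (if t ≠ "" then "\\textbullet\\ " ++ pyEscape t else "") = cellB t := by
  rw [cellB, escape_eq]

-- ---- A's loop as a join over row indices ----

theorem sfoldl_shift (l : List String) :
    ∀ (a b : String), l.foldl (· ++ ·) (a ++ b) = a ++ l.foldl (· ++ ·) b := by
  induction l with
  | nil => intro a b; rfl
  | cons x t ih => intro a b; simpa [String.append_assoc] using ih a (b ++ x)

theorem foldl_str {α : Type} (g : α → String) :
    ∀ (l : List α) (init : String),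
      l.foldl (fun acc x => acc ++ g x) init = init ++ String.join (l.map g) := by
  intro l
  induction l with
  | nil => intro init; simp [String.join]
  | cons x t ih =>
    intro init
    simp only [List.foldl_cons, List.map_cons, ih]
    have : String.join (g x :: t.map g) = g x ++ String.join (t.map g) := by
      simpa [String.join] using sfoldl_shift (t.map g) (g x) ""
    rw [this, String.append_assoc]

def rowIdx (skills softwares : List String) (hs hf : Nat) (k : Nat) : String :=
  cellB (skills.getD k "") ++ " & " ++ cellB (skills.getD (k + hs) "") ++ " & " ++
    cellB (softwares.getD k "") ++ " & " ++ cellB (softwares.getD (k + hf) "") ++ "\\\\\n"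

theorem guardGet (xs : List String) (k : Nat) :
    (if (k : Int) < (xs.length : Int) then PySem.List.pyGetD xs (k : Int) "" else "")
      = xs.getD k "" := by
  rw [PySem.List.pyGetD_natCast]
  split_ifs with h
  · rfl
  · rw [List.getD_eq_default]
    omega

theorem fdiv_half (n : Nat) : PySem.Int.floordiv ((n : Int) + 1) 2 = (((n + 1) / 2 : Nat) : Int) := by
  rw [PySem.Int.floordiv, show ((n : Int) + 1) = ((n + 1 : Nat) : Int) by push_cast; ring,
      show (2 : Int) = ((2 : Nat) : Int) by rfl, Int.ofNat_fdiv]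

theorem A_eq (skills softwares : List String) (h : ¬(skills = [] ∧ softwares = [])) :
    format_skills_and_softwares skills softwares =
      "\\vspace{0.2cm}\n" ++ "\\noindent\\textbf{HABILIDADES \\& SOFTWARES}\\\\\n" ++
        "\\noindent\\begin{tabularx}{\\textwidth}{XXXX}\n" ++
        String.join ((List.range (max ((skills.length + 1) / 2) ((softwares.length + 1) / 2))).map
          (rowIdx skills softwares ((skills.length + 1) / 2) ((softwares.length + 1) / 2))) ++
        "\\end{tabularx}\n" := by
  have h0 : ¬((skills.length : Int) + (softwares.length : Int) = 0) := by
    have h1 : skills ≠ [] ∨ softwares ≠ [] := by tauto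
    have h2 : skills.length ≠ 0 ∨ softwares.length ≠ 0 := by
      rcases h1 with h' | h'
      · exact Or.inl (fun hl => h' (List.eq_nil_of_length_eq_zero hl))
      · exact Or.inr (fun hl => h' (List.eq_nil_of_length_eq_zero hl))
    omega
  simp only [format_skills_and_softwares, if_neg h0]
  simp only [fdiv_half, ← Nat.cast_max, PySem.List.pyRange_one, sub_zero, Int.toNat_natCast,
    List.foldl_map, zero_add, ← Nat.cast_add, guardGet, cell_eq]
  rw [foldl_str]
  rfl

-- ---- grid primitives: reading a cell, and how place/scatter act on cells ----

def gget (g : List (List String)) (r c : Nat) : String := (g.getD r []).getD c ""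

theorem gget_modify_set_ne (g : List (List String)) (r0 c0 : Nat) (v : String) (r c : Nat)
    (h : r ≠ r0 ∨ c ≠ c0) :
    gget (g.modify r0 (fun row => row.set c0 v)) r c = gget g r c := by
  simp only [gget, List.getD_eq_getElem?_getD, List.getElem?_modify]
  cases hg : g[r]? with
  | none => simp
  | some row =>
    simp only [Option.map_eq_map, Option.map_some, Option.getD_some]
    by_cases hr : r0 = r
    · subst hr
      have hc : c ≠ c0 := by tauto
      rw [if_pos rfl, List.getElem?_set, if_neg (fun e => hc e.symm)]
    · rw [if_neg hr]

theorem gget_modify_set_eq (g : List (List String)) (r0 c0 : Nat) (v : String)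
    (hr : r0 < g.length) (hc : c0 < (g.getD r0 []).length) :
    gget (g.modify r0 (fun row => row.set c0 v)) r0 c0 = v := by
  have hg : g[r0]? = some (g.getD r0 []) := by
    rw [List.getD_eq_getElem?_getD, List.getElem?_eq_getElem hr]; rfl
  have key : (g.modify r0 fun row => row.set c0 v).getD r0 [] = (g.getD r0 []).set c0 v := by
    conv_lhs => rw [List.getD_eq_getElem?_getD, List.getElem?_modify, hg]
    simp only [Option.map_eq_map, Option.map_some, Option.getD_some]
    simp
  rw [gget, key, List.getD_eq_getElem?_getD, List.getElem?_set, if_pos rfl, if_pos hc,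
    Option.getD_some]

theorem rowlen_modify_set (g : List (List String)) (r0 c0 : Nat) (v : String) (r : Nat) :
    ((g.modify r0 (fun row => row.set c0 v)).getD r []).length = (g.getD r []).length := by
  simp only [List.getD_eq_getElem?_getD, List.getElem?_modify]
  cases hg : g[r]? with
  | none => simp
  | some row => by_cases hr : r0 = r <;> simp [hr, List.length_set]

theorem length_place (g : List (List String)) (off half rows i : Nat) (s : String) :
    (place g off half rows i s).length = g.length := by
  unfold place
  split_ifs <;> simp [List.length_modify]

theorem rowlen_place (g : List (List String)) (off half rows i : Nat) (s : String) (r : Nat) :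
    ((place g off half rows i s).getD r []).length = (g.getD r []).length := by
  unfold place
  split_ifs
  · rw [rowlen_modify_set, rowlen_modify_set]
  · rw [rowlen_modify_set]
  · rw [rowlen_modify_set]
  · rfl
  · rfl

theorem gget_place_ne (g : List (List String)) (off half rows i : Nat) (s : String) (r c : Nat)
    (h1 : ¬(i < rows ∧ r = i ∧ c = off)) (h2 : ¬(half ≤ i ∧ r = i - half ∧ c = off + 1)) :
    gget (place g off half rows i s) r c = gget g r c := by
  unfold place
  split_ifs with hs ha hb hb
  · rw [gget_modify_set_ne _ _ _ _ _ _ (by tauto), gget_modify_set_ne _ _ _ _ _ _ (by tauto)]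
  · rw [gget_modify_set_ne _ _ _ _ _ _ (by tauto)]
  · rw [gget_modify_set_ne _ _ _ _ _ _ (by tauto)]
  · rfl
  · rfl

theorem scatter_cons (off half rows : Nat) (g : List (List String)) (p : String × Nat)
    (l : List (String × Nat)) :
    scatter off half rows g (p :: l) = scatter off half rows (place g off half rows p.2 p.1) l := rfl

theorem scatter_cons_mk (off half rows : Nat) (g : List (List String)) (s : String) (i : Nat)
    (l : List (String × Nat)) :
    scatter off half rows g ((s, i) :: l) = scatter off half rows (place g off half rows i s) l := rfl

theorem scatter_append (off half rows : Nat) (g : List (List String))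
    (l1 l2 : List (String × Nat)) :
    scatter off half rows g (l1 ++ l2) = scatter off half rows (scatter off half rows g l1) l2 :=
  List.foldl_append

theorem length_scatter (off half rows : Nat) (l : List (String × Nat)) :
    ∀ g, (scatter off half rows g l).length = g.length := by
  induction l with
  | nil => intro g; rfl
  | cons p t ih => intro g; rw [scatter_cons, ih, length_place]

theorem rowlen_scatter (off half rows : Nat) (l : List (String × Nat)) (r : Nat) :
    ∀ g, ((scatter off half rows g l).getD r []).length = (g.getD r []).length := by
  induction l with
  | nil => intro g; rfl
  | cons p t ih => intro g; rw [scatter_cons, ih, rowlen_place]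

theorem gget_scatter_ne (off half rows : Nat) (r c : Nat) (l : List (String × Nat)) :
    ∀ g, (∀ p ∈ l, ¬(p.2 < rows ∧ r = p.2 ∧ c = off) ∧ ¬(half ≤ p.2 ∧ r = p.2 - half ∧ c = off + 1)) →
      gget (scatter off half rows g l) r c = gget g r c := by
  induction l with
  | nil => intro g _; rfl
  | cons p t ih =>
    intro g hl
    rw [scatter_cons, ih _ (fun q hq => hl q (List.mem_cons_of_mem p hq)),
      gget_place_ne _ _ _ _ _ _ _ _ (hl p (List.mem_cons_self)).1 (hl p (List.mem_cons_self)).2]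

theorem cellB_empty : cellB "" = "" := by simp [cellB]

-- value of a scatter at its first column: cell (r, off) holds the r-th item
theorem gget_scatter_col0 (off half rows : Nat) (xs : List String) (g : List (List String))
    (hlen : g.length = rows) (hrow : ∀ r' < rows, (g.getD r' []).length = 4)
    (hoff : off < 4) (r : Nat) (hr : r < rows) (h0 : gget g r off = "") :
    gget (scatter off half rows g xs.zipIdx) r off = cellB (xs.getD r "") := by
  by_cases hx : r < xs.length
  · have hsplit : xs.zipIdx = (xs.take r).zipIdx ++ ((xs[r], r) :: (xs.drop (r + 1)).zipIdx (r + 1)) := by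
      conv_lhs => rw [← List.take_append_drop r xs]
      rw [List.zipIdx_append, List.length_take, Nat.min_eq_left (Nat.le_of_lt hx),
        List.drop_eq_getElem_cons hx, List.zipIdx_cons]
      simp
    rw [hsplit, scatter_append, scatter_cons_mk]
    have htake : ∀ p ∈ (xs.take r).zipIdx,
        ¬(p.2 < rows ∧ r = p.2 ∧ off = off) ∧ ¬(half ≤ p.2 ∧ r = p.2 - half ∧ off = off + 1) := by
      intro p hp
      obtain ⟨_, hlt, _⟩ := List.mem_zipIdx (x := p.1) (i := p.2) hp
      constructor
      · rintro ⟨_, he, _⟩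
        rw [List.length_take, Nat.min_eq_left (Nat.le_of_lt hx)] at hlt
        omega
      · rintro ⟨_, _, habs⟩; omega
    have hdrop : ∀ p ∈ (xs.drop (r + 1)).zipIdx (r + 1),
        ¬(p.2 < rows ∧ r = p.2 ∧ off = off) ∧ ¬(half ≤ p.2 ∧ r = p.2 - half ∧ off = off + 1) := by
      intro p hp
      obtain ⟨hge, _, _⟩ := List.mem_zipIdx (x := p.1) (i := p.2) hp
      exact ⟨by rintro ⟨_, he, _⟩; omega, by rintro ⟨_, _, habs⟩; omega⟩
    rw [gget_scatter_ne _ _ _ _ _ _ _ hdrop]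
    have hg1 : gget (scatter off half rows g (xs.take r).zipIdx) r off = "" := by
      rw [gget_scatter_ne _ _ _ _ _ _ _ htake, h0]
    set g1 := scatter off half rows g (xs.take r).zipIdx with hg1def
    have hlen1 : g1.length = rows := by rw [hg1def, length_scatter, hlen]
    have hrow1 : (g1.getD r []).length = 4 := by rw [hg1def, rowlen_scatter]; exact hrow r hr
    rw [List.getD_eq_getElem _ _ hx]
    unfold place
    split_ifs with hs0 hh0
    · show gget ((g1.modify r fun row => row.set off (bulletB xs[r])).modify (r - half)
          fun row => row.set (off + 1) (bulletB xs[r])) r off = cellB xs[r]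
      rw [gget_modify_set_ne _ _ _ _ _ _ (Or.inr (by omega)),
        gget_modify_set_eq _ _ _ _ (by omega) (by omega)]
      simp [cellB, bulletB, hs0]
    · show gget (g1.modify r fun row => row.set off (bulletB xs[r])) r off = cellB xs[r]
      rw [gget_modify_set_eq _ _ _ _ (by omega) (by omega)]
      simp [cellB, bulletB, hs0]
    · rw [hg1]
      simp [cellB, not_not.mp hs0]
  · have hall : ∀ p ∈ xs.zipIdx,
        ¬(p.2 < rows ∧ r = p.2 ∧ off = off) ∧ ¬(half ≤ p.2 ∧ r = p.2 - half ∧ off = off + 1) := by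
      intro p hp
      obtain ⟨_, hlt, _⟩ := List.mem_zipIdx (x := p.1) (i := p.2) hp
      exact ⟨by rintro ⟨_, he, _⟩; omega, by rintro ⟨_, _, habs⟩; omega⟩
    rw [gget_scatter_ne _ _ _ _ _ _ _ hall, h0, List.getD_eq_default _ _ (by omega), cellB_empty]

-- value of a scatter at its second column: cell (r, off+1) holds the (r+half)-th item
theorem gget_scatter_col1 (off half rows : Nat) (xs : List String) (g : List (List String))
    (hlen : g.length = rows) (hrow : ∀ r' < rows, (g.getD r' []).length = 4)
    (hoff : off + 1 < 4) (r : Nat) (hr : r < rows)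
    (h0 : gget g r (off + 1) = "") :
    gget (scatter off half rows g xs.zipIdx) r (off + 1) = cellB (xs.getD (r + half) "") := by
  by_cases hx : r + half < xs.length
  · have hsplit : xs.zipIdx = (xs.take (r + half)).zipIdx ++
        ((xs[r + half], r + half) :: (xs.drop (r + half + 1)).zipIdx (r + half + 1)) := by
      conv_lhs => rw [← List.take_append_drop (r + half) xs]
      rw [List.zipIdx_append, List.length_take, Nat.min_eq_left (Nat.le_of_lt hx),
        List.drop_eq_getElem_cons hx, List.zipIdx_cons]
      simp
    rw [hsplit, scatter_append, scatter_cons_mk]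
    have htake : ∀ p ∈ (xs.take (r + half)).zipIdx,
        ¬(p.2 < rows ∧ r = p.2 ∧ off + 1 = off) ∧ ¬(half ≤ p.2 ∧ r = p.2 - half ∧ off + 1 = off + 1) := by
      intro p hp
      obtain ⟨_, hlt, _⟩ := List.mem_zipIdx (x := p.1) (i := p.2) hp
      rw [List.length_take, Nat.min_eq_left (Nat.le_of_lt hx)] at hlt
      exact ⟨by rintro ⟨_, _, habs⟩; omega, by rintro ⟨hge, he, _⟩; omega⟩
    have hdrop : ∀ p ∈ (xs.drop (r + half + 1)).zipIdx (r + half + 1),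
        ¬(p.2 < rows ∧ r = p.2 ∧ off + 1 = off) ∧ ¬(half ≤ p.2 ∧ r = p.2 - half ∧ off + 1 = off + 1) := by
      intro p hp
      obtain ⟨hge, _, _⟩ := List.mem_zipIdx (x := p.1) (i := p.2) hp
      exact ⟨by rintro ⟨_, _, habs⟩; omega, by rintro ⟨hh, he, _⟩; omega⟩
    rw [gget_scatter_ne _ _ _ _ _ _ _ hdrop]
    have hg1 : gget (scatter off half rows g (xs.take (r + half)).zipIdx) r (off + 1) = "" := by
      rw [gget_scatter_ne _ _ _ _ _ _ _ htake, h0]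
    set g1 := scatter off half rows g (xs.take (r + half)).zipIdx with hg1def
    have hlen1 : g1.length = rows := by rw [hg1def, length_scatter, hlen]
    have hrow1 : (g1.getD r []).length = 4 := by rw [hg1def, rowlen_scatter]; exact hrow r hr
    rw [List.getD_eq_getElem _ _ hx]
    unfold place
    split_ifs with hs0 hr0 hh0
    · rw [show r + half - half = r from by omega]
      show gget ((g1.modify (r + half) fun row => row.set off (bulletB xs[r + half])).modify r
          fun row => row.set (off + 1) (bulletB xs[r + half])) r (off + 1) = cellB xs[r + half]
      rw [gget_modify_set_eq _ _ _ _ (by rw [List.length_modify]; omega)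
          (by rw [rowlen_modify_set]; omega)]
      simp [cellB, bulletB, hs0]
    · omega
    · rw [show r + half - half = r from by omega]
      show gget (g1.modify r fun row => row.set (off + 1) (bulletB xs[r + half])) r (off + 1)
          = cellB xs[r + half]
      rw [gget_modify_set_eq _ _ _ _ (by omega) (by omega)]
      simp [cellB, bulletB, hs0]
    · omega
    · rw [hg1]
      simp [cellB, not_not.mp hs0]
  · have hall : ∀ p ∈ xs.zipIdx,
        ¬(p.2 < rows ∧ r = p.2 ∧ off + 1 = off) ∧ ¬(half ≤ p.2 ∧ r = p.2 - half ∧ off + 1 = off + 1) := by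
      intro p hp
      obtain ⟨_, hlt, _⟩ := List.mem_zipIdx (x := p.1) (i := p.2) hp
      exact ⟨by rintro ⟨_, _, habs⟩; omega, by rintro ⟨hh, he, _⟩; omega⟩
    rw [gget_scatter_ne _ _ _ _ _ _ _ hall, h0, List.getD_eq_default _ _ (by omega), cellB_empty]

-- ---- assembling B's grid row by row ----

theorem str_ext (s t : String) (h : s.toList = t.toList) : s = t := by
  have h1 : String.ofList s.toList = String.ofList t.toList := by rw [h]
  simpa [String.ofList_toList] using h1

theorem join4 (a b c d : String) :
    PySem.Str.join " & " [a, b, c, d] = a ++ " & " ++ b ++ " & " ++ c ++ " & " ++ d := by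
  apply str_ext
  simp [PySem.Str.join, PySem.Chars.join, List.intercalate, List.intersperse, String.toList_append]

theorem list_len4 (l : List String) (h : l.length = 4) :
    l = [l.getD 0 "", l.getD 1 "", l.getD 2 "", l.getD 3 ""] := by
  match l, h with
  | [a, b, c, d], _ => rfl

theorem B_eq (skills softwares : List String) (h : ¬(skills = [] ∧ softwares = [])) :
    format_skills_and_softwares_alt skills softwares =
      "\\vspace{0.2cm}\n" ++ "\\noindent\\textbf{HABILIDADES \\& SOFTWARES}\\\\\n" ++
        "\\noindent\\begin{tabularx}{\\textwidth}{XXXX}\n" ++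
        String.join ((List.range (max ((skills.length + 1) / 2) ((softwares.length + 1) / 2))).map
          (rowIdx skills softwares ((skills.length + 1) / 2) ((softwares.length + 1) / 2))) ++
        "\\end{tabularx}\n" := by
  have hb : (skills.isEmpty && softwares.isEmpty) = false := by
    rcases (not_and_or.mp h) with h' | h' <;> simp [List.isEmpty_iff, h']
  simp only [format_skills_and_softwares_alt, hb, Bool.false_eq_true, if_false]
  set hs := (skills.length + 1) / 2 with hhs
  set hf := (softwares.length + 1) / 2 with hhf
  set rows := max hs hf with hrows
  set g0 := List.replicate rows ["", "", "", ""] with hg0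
  set g1 := scatter 0 hs rows g0 skills.zipIdx with hg1
  set g2 := scatter 2 hf rows g1 softwares.zipIdx with hg2
  have row0 : ∀ r' < rows, (g0.getD r' []).length = 4 := by
    intro r' hr'
    rw [hg0, List.getD_eq_getElem?_getD, List.getElem?_replicate, if_pos hr']
    rfl
  have gget0 : ∀ r c : Nat, gget g0 r c = "" := by
    intro r c
    rw [gget, hg0]
    rcases lt_or_ge r rows with hlt | hge
    · rw [List.getD_replicate _ hlt]
      rcases c with _ | _ | _ | _ | c <;> rfl
    · have hnil : (List.replicate rows (["", "", "", ""] : List String)).getD r [] = [] :=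
        List.getD_eq_default _ _ (by rw [List.length_replicate]; omega)
      rw [hnil]
      rcases c with _ | c <;> rfl
  have len0 : g0.length = rows := by rw [hg0, List.length_replicate]
  have len1 : g1.length = rows := by rw [hg1, length_scatter, len0]
  have row1 : ∀ r' < rows, (g1.getD r' []).length = 4 := by
    intro r' hr'; rw [hg1, rowlen_scatter]; exact row0 r' hr'
  have len2 : g2.length = rows := by rw [hg2, length_scatter, len1]
  have row2 : ∀ r' < rows, (g2.getD r' []).length = 4 := by
    intro r' hr'; rw [hg2, rowlen_scatter]; exact row1 r' hr'
  -- skills' scatter leaves columns 2 and 3 empty; softwares' leaves 0 and 1 alone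
  have g1c23 : ∀ r c, c = 2 ∨ c = 3 → gget g1 r c = "" := by
    intro r c hc
    rw [hg1, gget_scatter_ne _ _ _ _ _ _ _ (by
      intro p hp
      exact ⟨by rintro ⟨_, _, habs⟩; omega, by rintro ⟨_, _, habs⟩; omega⟩)]
    exact gget0 r c
  have g2c01 : ∀ r c, c = 0 ∨ c = 1 → gget g2 r c = gget g1 r c := by
    intro r c hc
    rw [hg2, gget_scatter_ne _ _ _ _ _ _ _ (by
      intro p hp
      exact ⟨by rintro ⟨_, _, habs⟩; omega, by rintro ⟨_, _, habs⟩; omega⟩)]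
  have hgrid : ∀ r < rows, g2.getD r [] =
      [cellB (skills.getD r ""), cellB (skills.getD (r + hs) ""),
       cellB (softwares.getD r ""), cellB (softwares.getD (r + hf) "")] := by
    intro r hr
    have c0 : gget g2 r 0 = cellB (skills.getD r "") := by
      rw [g2c01 r 0 (Or.inl rfl), hg1]
      exact gget_scatter_col0 0 hs rows skills g0 len0 row0 (by omega) r hr (gget0 r 0)
    have c1 : gget g2 r 1 = cellB (skills.getD (r + hs) "") := by
      rw [g2c01 r 1 (Or.inr rfl), hg1]
      exact gget_scatter_col1 0 hs rows skills g0 len0 row0 (by omega) r hr (gget0 r 1)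
    have c2 : gget g2 r 2 = cellB (softwares.getD r "") := by
      rw [hg2]
      exact gget_scatter_col0 2 hf rows softwares g1 len1 row1 (by omega) r hr (g1c23 r 2 (Or.inl rfl))
    have c3 : gget g2 r 3 = cellB (softwares.getD (r + hf) "") := by
      rw [hg2]
      exact gget_scatter_col1 2 hf rows softwares g1 len1 row1 (by omega) r hr (g1c23 r 3 (Or.inr rfl))
    rw [list_len4 _ (row2 r hr)]
    rw [show (g2.getD r []).getD 0 "" = gget g2 r 0 from rfl, c0,
        show (g2.getD r []).getD 1 "" = gget g2 r 1 from rfl, c1,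
        show (g2.getD r []).getD 2 "" = gget g2 r 2 from rfl, c2,
        show (g2.getD r []).getD 3 "" = gget g2 r 3 from rfl, c3]
  have hmap : g2.map (fun row => PySem.Str.join " & " row ++ "\\\\\n")
      = (List.range rows).map (rowIdx skills softwares hs hf) := by
    apply List.ext_getElem
    · simp [len2]
    · intro i hi1 hi2
      have hir : i < rows := by simpa [len2] using hi1
      simp only [List.getElem_map, List.getElem_range]
      rw [show g2[i] = g2.getD i [] from (List.getD_eq_getElem _ _ (by omega)).symm,
        hgrid i hir, join4, rowIdx]
  rw [hmap]

-- ===== VERDICT (by name: the statement is the Claim_ definition above) =====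
theorem format_skills_and_softwares_spec : Claim_equal_format_skills_and_softwares := by
  intro skills softwares _
  unfold Spec_format_skills_and_softwares
  by_cases h : skills = [] ∧ softwares = []
  · rcases h with ⟨h1, h2⟩; subst h1; subst h2; rfl
  · rw [A_eq skills softwares h, B_eq skills softwares h]
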